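-- pv_equiv track=rewrite | github.com/enspectr/uart-logger | uart-pretty.py | frames_9600
-- ===== SOURCE A (Python) =====
-- from collections import defaultdict
--
-- def frames_9600(entries):
--     by = defaultdict(list)
--     for ch, ts, ms, b in entries:
--         by[ch].append((ts, ms, b))
--
--     frames = []
--     for ch, seq in by.items():
--         buf = None
--         for ts, ms, b in seq:
--             if b == 0x02:
--                 buf = [(ts, ms, b)]
--                 continue
--             if buf is not None:
--                 buf.append((ts, ms, b))
--                 if b == 0x03:
--                     frames.append((ch, buf[0][0], buf[0][1], [x[2] for x in buf]))
--                     buf = None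
--         if buf:
--             frames.append((ch, buf[0][0], buf[0][1], [x[2] for x in buf]))
--     return frames
-- ===== SOURCE B (Python) =====
-- def frames_9600(entries):
--     # single streaming pass: per-channel open buffer + per-channel finished frames,
--     # channels emitted in first-appearance order
--     order = []
--     cur = {}    # ch -> open buffer (list of (ts, ms, b)) or None
--     done = {}   # ch -> list of completed frames for ch
--     for ch, ts, ms, b in entries:
--         if ch not in order:
--             order.append(ch)
--         if b == 0x02:
--             cur[ch] = [(ts, ms, b)]
--         else:
--             buf = cur.get(ch)
--             if buf is not None:
--                 buf = buf + [(ts, ms, b)]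
--                 if b == 0x03:
--                     done[ch] = done.get(ch, []) + [(ch, buf[0][0], buf[0][1], [x[2] for x in buf])]
--                     cur[ch] = None
--                 else:
--                     cur[ch] = buf
--     out = []
--     for ch in order:
--         out += done.get(ch, [])
--         buf = cur.get(ch)
--         if buf is not None:
--             out.append((ch, buf[0][0], buf[0][1], [x[2] for x in buf]))
--     return out
-- ===== Notes on version B (the rewrite author's own statement) =====
-- stated objective: alternative
-- what changed: Replaces A's two-phase group-by-channel-then-scan (defaultdict of full per-channel entry lists, then a second pass running the frame state machine per channel) with a single streaming pass that runs the state machine per channel on the fly, keeping only each channel's open buffer and completed frames, concatenated in first-appearance order at the end.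
import Mathlib
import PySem

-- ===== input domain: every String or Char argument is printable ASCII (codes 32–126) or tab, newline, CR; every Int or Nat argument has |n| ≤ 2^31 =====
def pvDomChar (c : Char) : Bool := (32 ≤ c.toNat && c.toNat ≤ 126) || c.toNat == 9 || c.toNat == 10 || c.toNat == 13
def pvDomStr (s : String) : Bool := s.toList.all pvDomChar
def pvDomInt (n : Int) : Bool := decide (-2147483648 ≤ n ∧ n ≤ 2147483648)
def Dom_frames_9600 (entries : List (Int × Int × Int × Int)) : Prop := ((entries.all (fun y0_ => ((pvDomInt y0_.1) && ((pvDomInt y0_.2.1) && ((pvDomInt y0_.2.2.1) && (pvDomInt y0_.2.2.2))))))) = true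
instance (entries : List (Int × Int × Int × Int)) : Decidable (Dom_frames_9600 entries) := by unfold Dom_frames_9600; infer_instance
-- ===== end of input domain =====

-- B replaces A's group-by-channel-then-scan with a single streaming pass keeping per-channel
-- open buffers and finished frames (alternative decomposition, same asymptotic cost).

-- ===== PORT A =====
-- frame built from a NONEMPTY buffer bs: (ch, buf[0][0], buf[0][1], [x[2] for x in buf]);
-- headI is exact here because both ports only call it on nonempty buffers (buf starts as [x]).
def pvMkFrame (ch : Int) (bs : List (Int × Int × Int)) : Int × Int × Int × List Int :=
  (ch, bs.headI.1, bs.headI.2.1, bs.map (fun x => x.2.2))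

-- 'if buf:' finalize at the end of A's per-channel loop (Python truthiness: None or empty list falsy)
def pvFinishA (ch : Int) (r : List (Int × Int × Int × List Int) × Option (List (Int × Int × Int))) :
    List (Int × Int × Int × List Int) :=
  match r.2 with
  | some bs => if bs.isEmpty then r.1 else r.1 ++ [pvMkFrame ch bs]
  | none => r.1

-- one iteration of A's inner per-channel loop; state = (frames-so-far, buf or None)
def pvStepA (ch : Int) (st : List (Int × Int × Int × List Int) × Option (List (Int × Int × Int)))
    (x : Int × Int × Int) : List (Int × Int × Int × List Int) × Option (List (Int × Int × Int)) :=
  if x.2.2 == 2 then (st.1, some [x])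
  else
    match st.2 with
    | some bs =>
        let bs' := bs ++ [x]
        if x.2.2 == 3 then (st.1 ++ [pvMkFrame ch bs'], none) else (st.1, some bs')
    | none => st

def frames_9600 (entries : List (Int × Int × Int × Int)) : List (Int × Int × Int × List Int) :=
  -- by = defaultdict(list); for ch, ts, ms, b in entries: by[ch].append((ts, ms, b))
  let byD : PySem.Dict Int (List (Int × Int × Int)) :=
    entries.foldl (fun d e => d.modify e.1 [] (· ++ [(e.2.1, e.2.2.1, e.2.2.2)])) PySem.Dict.empty
  -- frames = []; for ch, seq in by.items(): run the state machine, then 'if buf:' finalize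
  byD.items.foldl (fun frames p => pvFinishA p.1 (p.2.foldl (pvStepA p.1) (frames, none))) []

-- ===== PORT B =====
-- trailing incomplete frame of a channel, from its open buffer (or None)
def pvTail (ch : Int) (buf : Option (List (Int × Int × Int))) : List (Int × Int × Int × List Int) :=
  match buf with
  | some bs => [pvMkFrame ch bs]
  | none => []

-- one iteration of B's streaming loop; state = (order, cur : ch -> open buffer or None, done : ch -> frames)
def pvStepB
    (st : List Int × PySem.Dict Int (Option (List (Int × Int × Int))) × PySem.Dict Int (List (Int × Int × Int × List Int)))
    (e : Int × Int × Int × Int) :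
    List Int × PySem.Dict Int (Option (List (Int × Int × Int))) × PySem.Dict Int (List (Int × Int × Int × List Int)) :=
  let ch := e.1
  let x : Int × Int × Int := (e.2.1, e.2.2.1, e.2.2.2)
  let order := PySem.Set.add st.1 ch
  if e.2.2.2 == 2 then (order, st.2.1.insert ch (some [x]), st.2.2)
  else
    match st.2.1.getD ch none with
    | some bs =>
        let bs' := bs ++ [x]
        if e.2.2.2 == 3 then
          (order, st.2.1.insert ch none, st.2.2.modify ch [] (· ++ [pvMkFrame ch bs']))
        else (order, st.2.1.insert ch (some bs'), st.2.2)
    | none => (order, st.2.1, st.2.2)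

def frames_9600_alt (entries : List (Int × Int × Int × Int)) : List (Int × Int × Int × List Int) :=
  let st := entries.foldl pvStepB ([], PySem.Dict.empty, PySem.Dict.empty)
  st.1.flatMap (fun ch => st.2.2.getD ch [] ++ pvTail ch (st.2.1.getD ch none))

-- ===== PRECONDITION & SPEC =====
def Spec_frames_9600 (entries : List (Int × Int × Int × Int)) (out : List (Int × Int × Int × List Int)) : Prop := out = frames_9600_alt entries
instance (entries : List (Int × Int × Int × Int)) (out : List (Int × Int × Int × List Int)) : Decidable (Spec_frames_9600 entries out) := by unfold Spec_frames_9600; infer_instance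

-- ===== CLAIM (what is proved, stated in full; the proofs are below) =====
def Claim_equal_frames_9600 : Prop := ∀ (entries : List (Int × Int × Int × Int)), Dom_frames_9600 entries → Spec_frames_9600 entries (frames_9600 entries)

-- ===== LEMMAS AND PROOFS =====

-- the per-channel projection of the entries, and the per-channel machine run from a fresh state
def pvProj (entries : List (Int × Int × Int × Int)) (ch : Int) : List (Int × Int × Int) :=
  (entries.filter (fun e => e.1 == ch)).map (fun e => (e.2.1, e.2.2.1, e.2.2.2))

def pvRun (ch : Int) (seq : List (Int × Int × Int)) :
    List (Int × Int × Int × List Int) × Option (List (Int × Int × Int)) :=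
  seq.foldl (pvStepA ch) ([], none)

def pvRunAll (ch : Int) (entries : List (Int × Int × Int × Int)) : List (Int × Int × Int × List Int) :=
  (pvRun ch (pvProj entries ch)).1 ++ pvTail ch (pvRun ch (pvProj entries ch)).2

theorem pvStepA_prefix (ch : Int) (fs : List (Int × Int × Int × List Int))
    (buf : Option (List (Int × Int × Int))) (x : Int × Int × Int) :
    pvStepA ch (fs, buf) x = (fs ++ (pvStepA ch ([], buf) x).1, (pvStepA ch ([], buf) x).2) := by
  unfold pvStepA
  cases buf <;> simp <;> split_ifs <;> simp

theorem pvFoldA_prefix (ch : Int) (seq : List (Int × Int × Int))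
    (fs : List (Int × Int × Int × List Int)) (buf : Option (List (Int × Int × Int))) :
    seq.foldl (pvStepA ch) (fs, buf) =
      (fs ++ (seq.foldl (pvStepA ch) ([], buf)).1, (seq.foldl (pvStepA ch) ([], buf)).2) := by
  induction seq generalizing fs buf with
  | nil => simp
  | cons x tl ih =>
    simp only [List.foldl_cons]
    rw [pvStepA_prefix, ih]
    conv_rhs => rw [← Prod.mk.eta (p := pvStepA ch ([], buf) x), ih]
    simp

-- the open buffer is never 'some []'
theorem pvRun_buf_ne_nil (ch : Int) (seq : List (Int × Int × Int))
    (fs : List (Int × Int × Int × List Int)) (buf : Option (List (Int × Int × Int)))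
    (h : ∀ bs, buf = some bs → bs ≠ []) :
    ∀ bs, (seq.foldl (pvStepA ch) (fs, buf)).2 = some bs → bs ≠ [] := by
  induction seq generalizing fs buf with
  | nil => exact h
  | cons x tl ih =>
    simp only [List.foldl_cons]
    rw [← Prod.mk.eta (p := pvStepA ch (fs, buf) x)]
    refine ih _ _ ?_
    intro cs hcs
    revert hcs
    unfold pvStepA
    cases buf <;> simp <;> split_ifs <;> simp
    all_goals (rintro rfl; simp)

theorem pvProj_append (l : List (Int × Int × Int × Int)) (e : Int × Int × Int × Int) (ch : Int) :
    pvProj (l ++ [e]) ch = pvProj l ch ++ (if e.1 == ch then [(e.2.1, e.2.2.1, e.2.2.2)] else []) := by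
  cases h : e.1 == ch <;> simp [pvProj, List.filter_append, h]

-- effect of one streaming step on each per-channel observation
theorem pvStepB_getD
    (st : List Int × PySem.Dict Int (Option (List (Int × Int × Int))) × PySem.Dict Int (List (Int × Int × Int × List Int)))
    (e : Int × Int × Int × Int) (ch : Int) :
    (pvStepB st e).1 = PySem.Set.add st.1 e.1 ∧
    (pvStepB st e).2.1.getD ch none =
      (if ch = e.1 then (pvStepA e.1 (st.2.2.getD e.1 [], st.2.1.getD e.1 none) (e.2.1, e.2.2.1, e.2.2.2)).2
       else st.2.1.getD ch none) ∧
    (pvStepB st e).2.2.getD ch [] =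
      (if ch = e.1 then (pvStepA e.1 (st.2.2.getD e.1 [], st.2.1.getD e.1 none) (e.2.1, e.2.2.1, e.2.2.2)).1
       else st.2.2.getD ch []) := by
  unfold pvStepB pvStepA
  cases hb : st.2.1.getD e.1 none <;>
    split_ifs <;>
      simp_all [PySem.Dict.getD_insert, PySem.Dict.getD_modify]

-- streaming invariant for B's fold
theorem pvB_invariant (l : List (Int × Int × Int × Int)) :
    (l.foldl pvStepB ([], PySem.Dict.empty, PySem.Dict.empty)).1 = PySem.Set.ofList (l.map (·.1)) ∧
    ∀ ch, (l.foldl pvStepB ([], PySem.Dict.empty, PySem.Dict.empty)).2.1.getD ch none = (pvRun ch (pvProj l ch)).2 ∧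
          (l.foldl pvStepB ([], PySem.Dict.empty, PySem.Dict.empty)).2.2.getD ch [] = (pvRun ch (pvProj l ch)).1 := by
  induction l using List.reverseRecOn with
  | nil =>
    refine ⟨rfl, fun ch => ?_⟩
    constructor <;> simp [pvRun, pvProj, PySem.Dict.getD_empty]
  | append_singleton l e ih =>
    obtain ⟨iho, ihc⟩ := ih
    simp only [List.foldl_append, List.foldl_cons, List.foldl_nil]
    refine ⟨?_, fun ch => ?_⟩
    · obtain ⟨ho, -, -⟩ := pvStepB_getD (l.foldl pvStepB ([], PySem.Dict.empty, PySem.Dict.empty)) e 0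
      rw [ho, iho]
      simp [PySem.Set.ofList_append_singleton]
    · obtain ⟨-, hc, hd⟩ := pvStepB_getD (l.foldl pvStepB ([], PySem.Dict.empty, PySem.Dict.empty)) e ch
      obtain ⟨ihc1, ihc2⟩ := ihc ch
      rw [hc, hd, pvProj_append]
      by_cases hch : ch = e.1
      · rw [hch]
        obtain ⟨ihc1', ihc2'⟩ := ihc e.1
        simp only [beq_self_eq_true, if_true]
        rw [show pvRun e.1 (pvProj l e.1 ++ [(e.2.1, e.2.2.1, e.2.2.2)]) =
              pvStepA e.1 (pvRun e.1 (pvProj l e.1)) (e.2.1, e.2.2.1, e.2.2.2) from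
            by simp [pvRun]]
        rw [← Prod.mk.eta (p := pvRun e.1 (pvProj l e.1)), ← ihc1', ← ihc2']
        exact ⟨rfl, rfl⟩
      · have hbe : (e.1 == ch) = false := by simp [Ne.symm hch]
        simp [hch, hbe, ihc1, ihc2]

theorem pvA_eq (entries : List (Int × Int × Int × Int)) :
    frames_9600 entries = (PySem.Set.ofList (entries.map (·.1))).flatMap (fun ch => pvRunAll ch entries) := by
  have hgrp : ∀ (l : List (Int × Int × Int × Int)),
      (l.foldl (fun d e => d.modify e.1 [] (· ++ [(e.2.1, e.2.2.1, e.2.2.2)])) PySem.Dict.empty).keys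
        = PySem.Set.ofList (l.map (·.1)) ∧
      ∀ c, (l.foldl (fun d e => d.modify e.1 [] (· ++ [(e.2.1, e.2.2.1, e.2.2.2)])) PySem.Dict.empty).getD c []
        = pvProj l c := by
    intro l
    induction l using List.reverseRecOn with
    | nil => exact ⟨by simp, fun c => by simp [pvProj, PySem.Dict.getD_empty]⟩
    | append_singleton l e ih =>
      obtain ⟨ihk, ihg⟩ := ih
      simp only [List.foldl_append, List.foldl_cons, List.foldl_nil]
      refine ⟨?_, fun c => ?_⟩
      · rw [PySem.Dict.keys_modify]
        by_cases hm : e.1 ∈ List.map (fun x => x.1) l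
        · have hcont : (l.foldl (fun d e => d.modify e.1 [] (· ++ [(e.2.1, e.2.2.1, e.2.2.2)])) PySem.Dict.empty).contains e.1 = true :=
            (PySem.Dict.contains_iff_mem_keys _ _).mpr (by rw [ihk]; exact (PySem.Set.mem_ofList _ _).mpr hm)
          rw [PySem.Dict.keys_insert_of_contains _ _ hcont, ihk]
          simp only [List.map_append, List.map_cons, List.map_nil, PySem.Set.ofList_append_singleton]
          rw [PySem.Set.add_of_mem ((PySem.Set.mem_ofList _ _).mpr hm)]
        · have hcont : (l.foldl (fun d e => d.modify e.1 [] (· ++ [(e.2.1, e.2.2.1, e.2.2.2)])) PySem.Dict.empty).contains e.1 = false :=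
            Bool.eq_false_iff.mpr (fun h => hm ((PySem.Set.mem_ofList _ _).mp (ihk ▸ (PySem.Dict.contains_iff_mem_keys _ _).mp h)))
          rw [PySem.Dict.keys_insert_of_not_contains _ _ hcont, ihk]
          simp only [List.map_append, List.map_cons, List.map_nil, PySem.Set.ofList_append_singleton]
          rw [PySem.Set.add_of_not_mem (fun h => hm ((PySem.Set.mem_ofList _ _).mp h))]
      · rw [PySem.Dict.getD_modify, pvProj_append]
        by_cases hc : c = e.1
        · simp [hc, ihg]
        · have : (e.1 == c) = false := by simp [Ne.symm hc]
          simp [hc, this, ihg]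
  obtain ⟨hkeys, hgetD⟩ := hgrp entries
  have hnodup : (entries.foldl (fun d e => d.modify e.1 [] (· ++ [(e.2.1, e.2.2.1, e.2.2.2)])) PySem.Dict.empty).keys.Nodup := by
    rw [hkeys]; exact PySem.Set.nodup_ofList _
  have hitems : (entries.foldl (fun d e => d.modify e.1 [] (· ++ [(e.2.1, e.2.2.1, e.2.2.2)])) PySem.Dict.empty).items
      = (PySem.Set.ofList (entries.map (·.1))).map (fun k => (k, pvProj entries k)) := by
    rw [PySem.Dict.items_eq_map_keys _ hnodup [], hkeys]
    exact List.map_congr_left (fun k _ => by rw [hgetD])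
  have hbody : ∀ (acc : List (Int × Int × Int × List Int)) (p : Int × List (Int × Int × Int)),
      p ∈ (entries.foldl (fun d e => d.modify e.1 [] (· ++ [(e.2.1, e.2.2.1, e.2.2.2)])) PySem.Dict.empty).items →
      pvFinishA p.1 (p.2.foldl (pvStepA p.1) (acc, none)) = acc ++ pvRunAll p.1 entries := by
    intro acc p hp
    have hp2 : p.2 = pvProj entries p.1 := by
      rw [hitems] at hp
      obtain ⟨k, hk, rfl⟩ := List.mem_map.1 hp
      rfl
    have hfold := pvFoldA_prefix p.1 (pvProj entries p.1) acc none
    simp only [hp2, pvRunAll, pvRun, pvFinishA, pvTail]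
    rw [hfold]
    cases hr : ((pvProj entries p.1).foldl (pvStepA p.1) ([], none)).2 with
    | none => simp
    | some bs =>
      have hb : bs ≠ [] := pvRun_buf_ne_nil p.1 (pvProj entries p.1) [] none (by simp) bs hr
      simp [List.isEmpty_eq_false_iff.2 hb]
  rw [show frames_9600 entries
      = (entries.foldl (fun d e => d.modify e.1 [] (· ++ [(e.2.1, e.2.2.1, e.2.2.2)])) PySem.Dict.empty).items.foldl
          (fun frames p => pvFinishA p.1 (p.2.foldl (pvStepA p.1) (frames, none))) [] from rfl]
  rw [PySem.List.foldl_congr_mem _ _ _ _ hbody, PySem.List.foldl_append_eq_flatMap, hitems]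
  simp [List.flatMap_map]

theorem pvB_eq (entries : List (Int × Int × Int × Int)) :
    frames_9600_alt entries = (PySem.Set.ofList (entries.map (·.1))).flatMap (fun ch => pvRunAll ch entries) := by
  rw [show frames_9600_alt entries
      = (entries.foldl pvStepB ([], PySem.Dict.empty, PySem.Dict.empty)).1.flatMap (fun ch =>
          (entries.foldl pvStepB ([], PySem.Dict.empty, PySem.Dict.empty)).2.2.getD ch [] ++
            pvTail ch ((entries.foldl pvStepB ([], PySem.Dict.empty, PySem.Dict.empty)).2.1.getD ch none)) from rfl]
  obtain ⟨ho, hc⟩ := pvB_invariant entries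
  rw [ho]
  refine List.flatMap_congr (fun ch _ => ?_)
  obtain ⟨h1, h2⟩ := hc ch
  rw [h1, h2, pvRunAll]

-- ===== VERDICT (by name: the statement is the Claim_ definition above) =====
theorem frames_9600_spec : Claim_equal_frames_9600 := by
  intro entries _
  unfold Spec_frames_9600
  rw [pvA_eq, pvB_eq]
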